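-- pv_equiv track=rewrite | github.com/laycher999/Nonogram-Pygame | handler.py | score_cells_horizontal
-- ===== SOURCE A (Python) =====
-- def score_cells_horizontal(art):
--     horizontal = {n: [] for n in range(len(art))}
--     i = -1
--     for list in art:
--         lenght = 0
--         i += 1
--         for cell in list:
--             if cell == 0 and lenght != 0:
--                 horizontal[i].append(lenght)
--                 lenght = 0
--             elif cell == 1:
--                 lenght += 1
--         if lenght != 0:
--             horizontal[i].append(lenght)
--     return horizontal
-- ===== SOURCE B (Python) =====
-- def score_cells_horizontal(art):
--     result = {}
--     for i, row in enumerate(art):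
--         # split the row into segments delimited by 0 cells
--         segments = []
--         current = []
--         for cell in row:
--             if cell == 0:
--                 segments.append(current)
--                 current = []
--             else:
--                 current.append(cell)
--         segments.append(current)
--         # count the 1s in each segment, keeping only nonzero counts
--         result[i] = [c for c in (seg.count(1) for seg in segments) if c != 0]
--     return result
-- ===== Notes on version B (the rewrite author's own statement) =====
-- stated objective: alternative
-- what changed: Replaces A's running-state machine (length counter reset/flushed in one pass, dict preseeded from range) with a group-then-count decomposition: each row is first split into segments at 0-cells, then each segment's count of 1s is kept when nonzero, built per row with enumerate.
import Mathlib
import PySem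

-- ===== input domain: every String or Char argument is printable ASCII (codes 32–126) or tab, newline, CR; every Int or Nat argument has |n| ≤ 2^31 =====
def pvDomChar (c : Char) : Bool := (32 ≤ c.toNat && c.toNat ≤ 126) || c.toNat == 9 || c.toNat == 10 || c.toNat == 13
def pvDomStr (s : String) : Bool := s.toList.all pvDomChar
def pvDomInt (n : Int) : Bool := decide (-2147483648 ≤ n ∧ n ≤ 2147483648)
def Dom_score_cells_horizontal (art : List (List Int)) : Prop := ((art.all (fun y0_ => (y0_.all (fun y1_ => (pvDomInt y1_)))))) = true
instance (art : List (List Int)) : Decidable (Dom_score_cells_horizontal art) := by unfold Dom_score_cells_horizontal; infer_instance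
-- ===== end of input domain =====

-- B replaces A's one-pass running-length state machine with a split-on-0-then-count-1s
-- decomposition per row (alternative decomposition, same cost).

-- ===== PORT A =====
-- horizontal[i].append(x) on the association-list representation of the dict
-- (every key 0..len(art)-1 is preseeded, so the Python lookup never raises KeyError;
-- this updates the first — here unique — entry with key i, exactly the Python mutation).
def pvAppendAt : List (Int × List Int) → Int → Int → List (Int × List Int)
  | [], _, _ => []
  | (k, v) :: rest, i, x =>
      if k = i then (k, v ++ [x]) :: rest else (k, v) :: pvAppendAt rest i x

def score_cells_horizontal (art : List (List Int)) : List (Int × List Int) :=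
  -- horizontal = {n: [] for n in range(len(art))}
  let horizontal : List (Int × List Int) :=
    (PySem.List.pyRange 0 art.length 1).map (fun n => (n, ([] : List Int)))
  -- i = -1; outer loop over the rows, inner loop over the cells
  let res := art.foldl (fun (s : List (Int × List Int) × Int) row =>
      let i := s.2 + 1
      let t := row.foldl (fun (t : List (Int × List Int) × Int) cell =>
          if cell = 0 ∧ t.2 ≠ 0 then (pvAppendAt t.1 i t.2, 0)
          else if cell = 1 then (t.1, t.2 + 1)
          else t) (s.1, (0 : Int))
      (if t.2 ≠ 0 then pvAppendAt t.1 i t.2 else t.1, i)) (horizontal, -1)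
  res.1

-- ===== PORT B =====
-- split the row into segments delimited by 0 cells (state: segments so far, current segment)
def pvSegsOf (row : List Int) : List (List Int) :=
  let s := row.foldl (fun (s : List (List Int) × List Int) cell =>
      if cell = 0 then (s.1 ++ [s.2], []) else (s.1, s.2 ++ [cell])) ([], [])
  s.1 ++ [s.2]

-- count the 1s in each segment, keeping only nonzero counts
def pvRowCounts (row : List Int) : List Int :=
  ((pvSegsOf row).map (fun seg => (PySem.List.count seg 1 : Int))).filter (fun c => c != 0)

def score_cells_horizontal_alt (art : List (List Int)) : List (Int × List Int) :=
  (PySem.List.enumerate art 0).map (fun p => (p.1, pvRowCounts p.2))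

-- ===== PRECONDITION & SPEC =====
def Spec_score_cells_horizontal (art : List (List Int)) (out : List (Int × List Int)) : Prop := out = score_cells_horizontal_alt art
instance (art : List (List Int)) (out : List (Int × List Int)) : Decidable (Spec_score_cells_horizontal art out) := by unfold Spec_score_cells_horizontal; infer_instance

-- ===== CLAIM (what is proved, stated in full; the proofs are below) =====
def Claim_equal_score_cells_horizontal : Prop := ∀ (art : List (List Int)), Dom_score_cells_horizontal art → Spec_score_cells_horizontal art (score_cells_horizontal art)

-- ===== LEMMAS AND PROOFS =====

-- characterisation of A's per-row state machine as a pure run list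
def pvRuns (len : Int) : List Int → List Int
  | [] => if len ≠ 0 then [len] else []
  | c :: rest =>
      if c = 0 ∧ len ≠ 0 then len :: pvRuns 0 rest
      else if c = 1 then pvRuns (len + 1) rest
      else pvRuns len rest

def pvApplyRuns (i : Int) (d : List (Int × List Int)) (rs : List Int) : List (Int × List Int) :=
  rs.foldl (fun d r => pvAppendAt d i r) d

-- A's inner loop plus the final flush equals appending the run list at key i
theorem pvInner_eq (i : Int) : ∀ (row : List Int) (d : List (Int × List Int)) (len : Int),
    (if (row.foldl (fun (t : List (Int × List Int) × Int) cell =>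
          if cell = 0 ∧ t.2 ≠ 0 then (pvAppendAt t.1 i t.2, 0)
          else if cell = 1 then (t.1, t.2 + 1)
          else t) (d, len)).2 ≠ 0 then
       pvAppendAt (row.foldl (fun (t : List (Int × List Int) × Int) cell =>
          if cell = 0 ∧ t.2 ≠ 0 then (pvAppendAt t.1 i t.2, 0)
          else if cell = 1 then (t.1, t.2 + 1)
          else t) (d, len)).1 i (row.foldl (fun (t : List (Int × List Int) × Int) cell =>
          if cell = 0 ∧ t.2 ≠ 0 then (pvAppendAt t.1 i t.2, 0)
          else if cell = 1 then (t.1, t.2 + 1)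
          else t) (d, len)).2
     else (row.foldl (fun (t : List (Int × List Int) × Int) cell =>
          if cell = 0 ∧ t.2 ≠ 0 then (pvAppendAt t.1 i t.2, 0)
          else if cell = 1 then (t.1, t.2 + 1)
          else t) (d, len)).1)
    = pvApplyRuns i d (pvRuns len row) := by
  intro row
  induction row with
  | nil =>
      intro d len
      simp only [List.foldl_nil, pvRuns, pvApplyRuns]
      split_ifs <;> simp [List.foldl]
  | cons c rest ih =>
      intro d len
      simp only [List.foldl_cons, pvRuns]
      by_cases h0 : c = 0 ∧ len ≠ 0
      · simp only [if_pos h0]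
        rw [show pvApplyRuns i d (len :: pvRuns 0 rest)
              = pvApplyRuns i (pvAppendAt d i len) (pvRuns 0 rest) from by
            simp [pvApplyRuns]]
        exact ih (pvAppendAt d i len) 0
      · simp only [if_neg h0]
        by_cases h1 : c = 1
        · simp only [if_pos h1]
          exact ih d (len + 1)
        · simp only [if_neg h1]
          exact ih d len

theorem pvAppendAt_append (pre rest : List (Int × List Int)) (i x : Int)
    (h : ∀ p ∈ pre, p.1 ≠ i) :
    pvAppendAt (pre ++ rest) i x = pre ++ pvAppendAt rest i x := by
  induction pre with
  | nil => simp
  | cons p ps ih =>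
      have hp : p.1 ≠ i := h p (by simp)
      cases p with
      | mk k v =>
        simp only [List.cons_append, pvAppendAt, if_neg hp]
        rw [ih (fun q hq => h q (by simp [hq]))]

theorem pvApplyRuns_split (i : Int) (rs : List Int) :
    ∀ (pre : List (Int × List Int)) (v : List Int) (rest : List (Int × List Int)),
    (∀ p ∈ pre, p.1 ≠ i) →
    pvApplyRuns i (pre ++ (i, v) :: rest) rs = pre ++ (i, v ++ rs) :: rest := by
  induction rs with
  | nil => intro pre v rest _; simp [pvApplyRuns]
  | cons r rs ih =>
      intro pre v rest h
      simp only [pvApplyRuns, List.foldl_cons]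
      rw [pvAppendAt_append _ _ _ _ h]
      rw [show pvAppendAt ((i, v) :: rest) i r = (i, v ++ [r]) :: rest from by
            simp [pvAppendAt]]
      have := ih pre (v ++ [r]) rest h
      simp only [pvApplyRuns] at this
      rw [this, List.append_assoc]
      simp

-- the outer loop fills the preseeded keys j, j+1, … in order
theorem pvOuter_eq : ∀ (rows : List (List Int)) (j : Int) (pre : List (Int × List Int)),
    (∀ p ∈ pre, p.1 < j) →
    (rows.foldl (fun (s : List (Int × List Int) × Int) row =>
      let i := s.2 + 1
      let t := row.foldl (fun (t : List (Int × List Int) × Int) cell =>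
          if cell = 0 ∧ t.2 ≠ 0 then (pvAppendAt t.1 i t.2, 0)
          else if cell = 1 then (t.1, t.2 + 1)
          else t) (s.1, (0 : Int))
      (if t.2 ≠ 0 then pvAppendAt t.1 i t.2 else t.1, i))
      (pre ++ (PySem.List.pyRange j (j + rows.length) 1).map (fun n => (n, ([] : List Int))), j - 1)).1
    = pre ++ (PySem.List.enumerate rows j).map (fun p => (p.1, pvRuns 0 p.2)) := by
  intro rows
  induction rows with
  | nil =>
      intro j pre _
      simp [PySem.List.pyRange_one_eq_nil (le_refl j), PySem.List.enumerate]
  | cons row rest ih =>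
      intro j pre h
      have hlen : j + ((row :: rest).length : Int) = (j + 1) + (rest.length : Int) := by
        rw [List.length_cons]; push_cast; omega
      rw [hlen]
      have hlt : j < (j + 1) + (rest.length : Int) := by
        have : (0 : Int) ≤ (rest.length : Int) := Int.natCast_nonneg _
        omega
      rw [PySem.List.pyRange_one_cons hlt]
      simp only [List.foldl_cons, List.map_cons]
      have hstep : j - 1 + 1 = j := by omega
      rw [hstep]
      have hne : ∀ p ∈ pre, p.1 ≠ j := fun p hp => ne_of_lt (h p hp)
      rw [pvInner_eq j row
            (pre ++ (j, ([] : List Int)) ::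
              (PySem.List.pyRange (j + 1) ((j + 1) + (rest.length : Int)) 1).map
                (fun n => (n, ([] : List Int)))) 0,
          pvApplyRuns_split j (pvRuns 0 row) pre [] _ hne]
      simp only [List.nil_append]
      rw [show pre ++ (j, pvRuns 0 row) ::
              (PySem.List.pyRange (j + 1) ((j + 1) + (rest.length : Int)) 1).map
                (fun n => (n, ([] : List Int)))
            = (pre ++ [(j, pvRuns 0 row)]) ++
              (PySem.List.pyRange (j + 1) ((j + 1) + (rest.length : Int)) 1).map
                (fun n => (n, ([] : List Int))) from by simp]
      have hpre' : ∀ p ∈ pre ++ [(j, pvRuns 0 row)], p.1 < j + 1 := by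
        intro p hp
        rcases List.mem_append.mp hp with hp | hp
        · exact lt_trans (h p hp) (by omega)
        · rw [List.mem_singleton] at hp
          subst hp
          show j < j + 1
          omega
      have ih' := ih (j + 1) (pre ++ [(j, pvRuns 0 row)]) hpre'
      rw [show j + 1 - 1 = j from by omega] at ih'
      rw [ih', PySem.List.enumerate_cons]
      simp

-- ===== B side: the group-then-count decomposition equals the run list =====
def pvSegsB (cur : List Int) : List Int → List (List Int)
  | [] => [cur]
  | c :: rest => if c = 0 then cur :: pvSegsB [] rest else pvSegsB (cur ++ [c]) rest

theorem pvSegs_foldl : ∀ (row : List Int) (done : List (List Int)) (cur : List Int),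
    (row.foldl (fun (s : List (List Int) × List Int) cell =>
      if cell = 0 then (s.1 ++ [s.2], []) else (s.1, s.2 ++ [cell])) (done, cur)).1
    ++ [(row.foldl (fun (s : List (List Int) × List Int) cell =>
      if cell = 0 then (s.1 ++ [s.2], []) else (s.1, s.2 ++ [cell])) (done, cur)).2]
    = done ++ pvSegsB cur row := by
  intro row
  induction row with
  | nil => intro done cur; simp [pvSegsB]
  | cons c rest ih =>
      intro done cur
      simp only [List.foldl_cons, pvSegsB]
      by_cases hc : c = 0
      · simp only [if_pos hc]
        rw [ih (done ++ [cur]) []]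
        simp
      · simp only [if_neg hc]
        exact ih done (cur ++ [c])

theorem pvCounts_eq : ∀ (row : List Int) (cur : List Int),
    ((pvSegsB cur row).map (fun seg => (PySem.List.count seg 1 : Int))).filter (fun c => c != 0)
    = pvRuns (PySem.List.count cur 1 : Int) row := by
  intro row
  induction row with
  | nil =>
      intro cur
      simp only [pvSegsB, pvRuns, List.map_cons, List.map_nil, List.filter_cons,
        List.filter_nil, PySem.List.count_eq]
      by_cases hc : List.count 1 cur = 0 <;> simp [hc]
  | cons c rest ih =>
      intro cur
      simp only [pvSegsB, pvRuns, PySem.List.count_eq]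
      by_cases hc0 : c = 0
      · subst hc0
        have hrec := ih []
        simp only [PySem.List.count_eq, List.count_nil, Nat.cast_zero] at hrec
        by_cases hc : List.count 1 cur = 0
        · simp [hc, hrec]
        · simp [hc, hrec]
      · have hrec := ih (cur ++ [c])
        simp only [PySem.List.count_eq] at hrec
        rw [if_neg (by simp [hc0] : ¬ (c = 0 ∧ ((List.count 1 cur : Nat) : Int) ≠ 0))]
        by_cases hc1 : c = 1
        · rw [if_pos hc1]
          have harg : ((List.count 1 (cur ++ [c]) : Nat) : Int)
              = ((List.count 1 cur : Nat) : Int) + 1 := by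
            subst hc1
            simp [List.count_append]
          rw [harg] at hrec
          simpa [pvSegsB, hc0, hc1] using hrec
        · rw [if_neg hc1]
          have harg : ((List.count 1 (cur ++ [c]) : Nat) : Int)
              = ((List.count 1 cur : Nat) : Int) := by
            have hnot : (1 : Int) ∉ [c] := by
              simp only [List.mem_singleton]
              exact fun h => hc1 h.symm
            simp [List.count_append, List.count_eq_zero.mpr hnot]
          rw [harg] at hrec
          simpa [pvSegsB, hc0, hc1] using hrec

theorem pvRowCounts_eq (row : List Int) : pvRowCounts row = pvRuns 0 row := by
  unfold pvRowCounts pvSegsOf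
  simp only []
  rw [show ((row.foldl (fun (s : List (List Int) × List Int) cell =>
      if cell = 0 then (s.1 ++ [s.2], []) else (s.1, s.2 ++ [cell])) ([], [])).1
    ++ [(row.foldl (fun (s : List (List Int) × List Int) cell =>
      if cell = 0 then (s.1 ++ [s.2], []) else (s.1, s.2 ++ [cell])) ([], [])).2])
      = [] ++ pvSegsB [] row from pvSegs_foldl row [] []]
  rw [List.nil_append, pvCounts_eq]
  norm_num [PySem.List.count_eq]

-- ===== VERDICT (by name: the statement is the Claim_ definition above) =====
theorem score_cells_horizontal_spec : Claim_equal_score_cells_horizontal := by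
  intro art _
  unfold Spec_score_cells_horizontal
  simp only [score_cells_horizontal, score_cells_horizontal_alt]
  have h0 := pvOuter_eq art 0 [] (by simp)
  rw [show (0 : Int) - 1 = -1 from by omega] at h0
  rw [show (0 : Int) + (art.length : Int) = (art.length : Int) from by omega] at h0
  calc _ = [] ++ (PySem.List.enumerate art 0).map (fun p => (p.1, pvRuns 0 p.2)) := h0
    _ = _ := by simp [pvRowCounts_eq]
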